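-- pv_equiv track=rewrite | github.com/MrBrantCode/unitest_baseline | mut_generate/mist_train_taco/taco_10618/solution.py | is_valid_v_shaped_track
-- ===== SOURCE A (Python) =====
-- def is_valid_v_shaped_track(A, N):
--     if N % 2 == 0:
--         return 'No'
--
--     mid = N // 2
--     if A[mid] != 1:
--         return 'No'
--
--     constant1 = abs(A[1] - A[0])
--     constant2 = abs(A[-1] - A[-2])
--
--     if constant1 == constant2 and constant1 != 0 and constant2 != 0:
--         left = 1
--         right = N - 2
--
--         while left < right:
--             if abs(A[left] - A[left + 1]) != constant1 or abs(A[right] - A[right - 1]) != constant2: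
--                 return 'No'
--             left += 1
--             right -= 1
--
--         return 'Yes'
--     else:
--         return 'No'
-- ===== SOURCE B (Python) =====
-- def is_valid_v_shaped_track(A, N):
--     if N % 2 == 1 and A[N // 2] == 1:
--         c = abs(A[1] - A[0])
--         if c != 0 and c == abs(A[-1] - A[-2]):
--             for i in range(1, N - 2):
--                 if abs(A[i] - A[i + 1]) != c:
--                     return 'No'
--             return 'Yes'
--     return 'No'
-- ===== Notes on version B (the rewrite author's own statement) =====
-- stated objective: simpler
-- what changed: A's two-pointer converging while-loop (checking a mirrored left pair and right pair per iteration, each against its own constant) is replaced by a single forward for-loop over range(1, N-2) checking each adjacent pair once against one constant, inside a flattened positive-guard structure that ends in one final 'No'.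
import Mathlib
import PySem

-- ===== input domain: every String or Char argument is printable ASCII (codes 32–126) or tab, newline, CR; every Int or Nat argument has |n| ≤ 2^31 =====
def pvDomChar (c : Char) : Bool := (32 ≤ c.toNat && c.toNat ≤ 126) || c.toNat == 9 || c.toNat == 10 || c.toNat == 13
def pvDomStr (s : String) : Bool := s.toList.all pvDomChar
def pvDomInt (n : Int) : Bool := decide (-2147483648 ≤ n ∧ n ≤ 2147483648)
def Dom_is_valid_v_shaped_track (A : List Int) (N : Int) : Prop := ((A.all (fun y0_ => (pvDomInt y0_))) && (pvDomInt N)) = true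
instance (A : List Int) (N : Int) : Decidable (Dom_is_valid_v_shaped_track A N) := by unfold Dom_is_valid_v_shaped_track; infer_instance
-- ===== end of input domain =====

-- B replaces A's two-pointer converging while-loop (mirrored left/right pair per iteration,
-- two constants) by one forward for-loop over range(1, N-2) against a single constant,
-- in a flattened positive-guard shape; objective: simpler, same O(N) cost.

-- ===== PORT A =====
-- A's while-loop: per iteration check the pair at `left` and the pair at `right`
-- (short-circuit: the right pair is only read if the left check passes), then converge.
-- `none` = IndexError.
def aLoop (A : List Int) (c1 c2 : Int) (left right : Int) : Option String :=
  if _h : left < right then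
    match PySem.List.pyGet? A left, PySem.List.pyGet? A (left + 1) with
    | some al, some al1 =>
      if |al - al1| ≠ c1 then some "No"
      else
        match PySem.List.pyGet? A right, PySem.List.pyGet? A (right - 1) with
        | some ar, some ar1 =>
          if |ar - ar1| ≠ c2 then some "No"
          else aLoop A c1 c2 (left + 1) (right - 1)
        | _, _ => none
    | _, _ => none
  else some "Yes"
termination_by (right - left).toNat
decreasing_by omega

def aCore (A : List Int) (N : Int) : Option String :=
  if PySem.Int.mod N 2 = 0 then some "No"
  else
    match PySem.List.pyGet? A (PySem.Int.floordiv N 2) with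
    | none => none
    | some am =>
      if am ≠ 1 then some "No"
      else
        match PySem.List.pyGet? A 1, PySem.List.pyGet? A 0,
              PySem.List.pyGet? A (-1), PySem.List.pyGet? A (-2) with
        | some a1, some a0, some an1, some an2 =>
          let c1 := |a1 - a0|
          let c2 := |an1 - an2|
          if c1 = c2 ∧ c1 ≠ 0 ∧ c2 ≠ 0 then aLoop A c1 c2 1 (N - 2)
          else some "No"
        | _, _, _, _ => none

-- `.getD ""` only fires on inputs where the Python raises IndexError; Pre_ excludes them.
def is_valid_v_shaped_track (A : List Int) (N : Int) : String :=
  (aCore A N).getD ""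

-- ===== PORT B =====
-- B's for-loop 'for i in range(1, N-2)': structural recursion over the range list.
def bCheck (A : List Int) (c : Int) : List Int → Option String
  | [] => some "Yes"
  | i :: rest =>
    match PySem.List.pyGet? A i, PySem.List.pyGet? A (i + 1) with
    | some x, some y => if |x - y| ≠ c then some "No" else bCheck A c rest
    | _, _ => none

def bCore (A : List Int) (N : Int) : Option String :=
  if PySem.Int.mod N 2 = 1 then
    match PySem.List.pyGet? A (PySem.Int.floordiv N 2) with
    | some am =>
      if am = 1 then
        match PySem.List.pyGet? A 1, PySem.List.pyGet? A 0 with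
        | some a1, some a0 =>
          let c := |a1 - a0|
          match PySem.List.pyGet? A (-1), PySem.List.pyGet? A (-2) with
          | some x, some y =>
            if c ≠ 0 ∧ c = |x - y| then bCheck A c (PySem.List.pyRange 1 (N - 2) 1)
            else some "No"
          | _, _ => none
        | _, _ => none
      else some "No"
    | none => none
  else some "No"

def is_valid_v_shaped_track_alt (A : List Int) (N : Int) : String :=
  (bCore A N).getD ""

-- ===== PRECONDITION & SPEC =====
-- Pre_ excludes exactly the inputs on which the Python A raises IndexError (mid out of
-- range; fewer than 2 elements after the mid test; or a converging loop that reaches an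
-- index ≥ len(A) before any in-range pair check fails); on every input where A returns,
-- Pre_ holds.
def Pre_is_valid_v_shaped_track (A : List Int) (N : Int) : Prop :=
  PySem.Int.mod N 2 = 0 ∨
  (PySem.Raise.InRange A.length (PySem.Int.floordiv N 2) ∧
   (PySem.List.pyGetD A (PySem.Int.floordiv N 2) 0 ≠ 1 ∨
    (2 ≤ A.length ∧
     (|PySem.List.pyGetD A 1 0 - PySem.List.pyGetD A 0 0| ≠
        |PySem.List.pyGetD A (-1) 0 - PySem.List.pyGetD A (-2) 0| ∨
      |PySem.List.pyGetD A 1 0 - PySem.List.pyGetD A 0 0| = 0 ∨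
      N ≤ 3 ∨ N - 2 < (A.length : Int) ∨
      (3 ≤ A.length ∧
       |PySem.List.pyGetD A 1 0 - PySem.List.pyGetD A 2 0| ≠
         |PySem.List.pyGetD A 1 0 - PySem.List.pyGetD A 0 0|)))))
instance (A : List Int) (N : Int) : Decidable (Pre_is_valid_v_shaped_track A N) := by
  unfold Pre_is_valid_v_shaped_track; infer_instance

def pvWitness_is_valid_v_shaped_track : List Int × Int := ([2, 1, 2], 3)

def Spec_is_valid_v_shaped_track (A : List Int) (N : Int) (out : String) : Prop := out = is_valid_v_shaped_track_alt A N
instance (A : List Int) (N : Int) (out : String) : Decidable (Spec_is_valid_v_shaped_track A N out) := by unfold Spec_is_valid_v_shaped_track; infer_instance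

-- ===== CLAIM (what is proved, stated in full; the proofs are below) =====
def Claim_equal_is_valid_v_shaped_track : Prop := ∀ (A : List Int) (N : Int), Dom_is_valid_v_shaped_track A N → Pre_is_valid_v_shaped_track A N → Spec_is_valid_v_shaped_track A N (is_valid_v_shaped_track A N)

-- ===== LEMMAS AND PROOFS =====

-- Pure forward conjunction of the pair checks on [l, r): the common value of both loops.
def allB (A : List Int) (c l r : Int) : Bool :=
  if _h : l < r then
    (|PySem.List.pyGetD A l 0 - PySem.List.pyGetD A (l + 1) 0| == c) && allB A c (l + 1) r
  else true
termination_by (r - l).toNat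
decreasing_by omega

lemma allB_peel_last (A : List Int) (c : Int) : ∀ (k : Nat) (l r : Int), (r - l).toNat = k →
    l < r →
    allB A c l r =
      (allB A c l (r - 1) &&
       (|PySem.List.pyGetD A (r - 1) 0 - PySem.List.pyGetD A r 0| == c)) := by
  intro k
  induction k using Nat.strong_induction_on with
  | _ k IH =>
    intro l r hk h
    by_cases h2 : l < r - 1
    · rw [allB]
      simp only [h, dite_true]
      rw [IH (r - (l + 1)).toNat (by omega) (l + 1) r rfl (by omega)]
      conv_rhs => rw [allB]
      simp only [h2, dite_true]
      rw [Bool.and_assoc]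
    · have e1 : allB A c (l + 1) r = true := by
        rw [allB]; simp [show ¬ (l + 1 < r) by omega]
      have e2 : allB A c l (r - 1) = true := by
        rw [allB]; simp [h2]
      rw [allB]
      simp only [h, dite_true, e1, e2, Bool.and_true, Bool.true_and]
      rw [show l + 1 = r by omega, show l = r - 1 by omega]

lemma bCheck_eq (A : List Int) (c : Int) : ∀ (k : Nat) (l r : Int), (r - l).toNat = k → 0 ≤ l →
    (l < r → r < (A.length : Int)) →
    bCheck A c (PySem.List.pyRange l r 1) = some (if allB A c l r then "Yes" else "No") := by
  intro k
  induction k using Nat.strong_induction_on with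
  | _ k IH =>
    intro l r hk hl hr
    by_cases h : l < r
    · have hrlen := hr h
      have g1 : PySem.List.pyGet? A l = some (A[l.toNat]'(by omega)) :=
        PySem.List.pyGet?_eq_some_getElem A (by omega) (by omega)
      have g2 : PySem.List.pyGet? A (l + 1) = some (A[(l + 1).toNat]'(by omega)) :=
        PySem.List.pyGet?_eq_some_getElem A (by omega) (by omega)
      have d1 : PySem.List.pyGetD A l 0 = A[l.toNat]'(by omega) := by
        unfold PySem.List.pyGetD
        rw [g1]
        rfl
      have d2 : PySem.List.pyGetD A (l + 1) 0 = A[(l + 1).toNat]'(by omega) := by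
        unfold PySem.List.pyGetD
        rw [g2]
        rfl
      rw [PySem.List.pyRange_one_cons h, bCheck]
      simp only [g1, g2]
      conv_rhs => rw [allB]
      simp only [h, dite_true, d1, d2]
      by_cases hc : |A[l.toNat]'(by omega) - A[(l + 1).toNat]'(by omega)| = c
      · rw [if_neg (not_not_intro hc), beq_iff_eq.mpr hc, Bool.true_and]
        exact IH (r - (l + 1)).toNat (by omega) (l + 1) r rfl (by omega) (by intro _; omega)
      · rw [if_pos hc, beq_eq_false_iff_ne.mpr hc, Bool.false_and]
        rfl
    · rw [PySem.List.pyRange_one_eq_nil (by omega), bCheck, allB]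
      simp [h]

lemma aLoop_eq (A : List Int) (c : Int) : ∀ (k : Nat) (l r : Int), (r - l).toNat = k → 0 ≤ l →
    (l < r → r < (A.length : Int)) →
    aLoop A c c l r = some (if allB A c l r then "Yes" else "No") := by
  intro k
  induction k using Nat.strong_induction_on with
  | _ k IH =>
    intro l r hk hl hr
    by_cases h : l < r
    · have hrlen := hr h
      have gl : PySem.List.pyGet? A l = some (A[l.toNat]'(by omega)) :=
        PySem.List.pyGet?_eq_some_getElem A (by omega) (by omega)
      have gl1 : PySem.List.pyGet? A (l + 1) = some (A[(l + 1).toNat]'(by omega)) :=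
        PySem.List.pyGet?_eq_some_getElem A (by omega) (by omega)
      have gr : PySem.List.pyGet? A r = some (A[r.toNat]'(by omega)) :=
        PySem.List.pyGet?_eq_some_getElem A (by omega) (by omega)
      have gr1 : PySem.List.pyGet? A (r - 1) = some (A[(r - 1).toNat]'(by omega)) :=
        PySem.List.pyGet?_eq_some_getElem A (by omega) (by omega)
      have dl : PySem.List.pyGetD A l 0 = A[l.toNat]'(by omega) := by
        unfold PySem.List.pyGetD
        rw [gl]
        rfl
      have dl1 : PySem.List.pyGetD A (l + 1) 0 = A[(l + 1).toNat]'(by omega) := by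
        unfold PySem.List.pyGetD
        rw [gl1]
        rfl
      have dr : PySem.List.pyGetD A r 0 = A[r.toNat]'(by omega) := by
        unfold PySem.List.pyGetD
        rw [gr]
        rfl
      have dr1 : PySem.List.pyGetD A (r - 1) 0 = A[(r - 1).toNat]'(by omega) := by
        unfold PySem.List.pyGetD
        rw [gr1]
        rfl
      rw [aLoop]
      simp only [h, dite_true, gl, gl1, gr, gr1]
      rw [allB_peel_last A c (r - l).toNat l r rfl h]
      conv_rhs => rw [allB]
      simp only [dl, dl1, dr, dr1]
      by_cases h2 : l < r - 1
      · simp only [h2, dite_true]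
        by_cases hc1 : |A[l.toNat]'(by omega) - A[(l + 1).toNat]'(by omega)| = c
        · have e1 : (|A[l.toNat]'(by omega) - A[(l + 1).toNat]'(by omega)| == c) = true :=
            beq_iff_eq.mpr hc1
          by_cases hc2 : |A[r.toNat]'(by omega) - A[(r - 1).toNat]'(by omega)| = c
          · have hc2' : |A[(r - 1).toNat]'(by omega) - A[r.toNat]'(by omega)| = c := by
              rw [abs_sub_comm]; exact hc2
            have e2 : (|A[(r - 1).toNat]'(by omega) - A[r.toNat]'(by omega)| == c) = true :=
              beq_iff_eq.mpr hc2'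
            rw [if_neg (not_not_intro hc1), if_neg (not_not_intro hc2), e1, e2,
              Bool.true_and, Bool.and_true]
            exact IH ((r - 1) - (l + 1)).toNat (by omega) (l + 1) (r - 1) rfl (by omega)
              (by intro _; omega)
          · have hc2' : ¬ |A[(r - 1).toNat]'(by omega) - A[r.toNat]'(by omega)| = c :=
              fun hx => hc2 (by rw [abs_sub_comm]; exact hx)
            have e2 : (|A[(r - 1).toNat]'(by omega) - A[r.toNat]'(by omega)| == c) = false :=
              beq_eq_false_iff_ne.mpr hc2'
            rw [if_neg (not_not_intro hc1), if_pos hc2, e2, Bool.and_false]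
            rfl
        · have e1 : (|A[l.toNat]'(by omega) - A[(l + 1).toNat]'(by omega)| == c) = false :=
            beq_eq_false_iff_ne.mpr hc1
          rw [if_pos hc1, e1, Bool.false_and, Bool.false_and]
          rfl
      · rw [dif_neg h2, Bool.true_and]
        simp only [show (r - 1).toNat = l.toNat from by omega,
          show r.toNat = (l + 1).toNat from by omega]
        by_cases hc : |A[l.toNat]'(by omega) - A[(l + 1).toNat]'(by omega)| = c
        · have hc' : |A[(l + 1).toNat]'(by omega) - A[l.toNat]'(by omega)| = c := by
            rw [abs_sub_comm]; exact hc
          rw [if_neg (not_not_intro hc), if_neg (not_not_intro hc'), aLoop,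
            dif_neg (show ¬ (l + 1 < r - 1) by omega), beq_iff_eq.mpr hc]
          rfl
        · rw [if_pos hc, beq_eq_false_iff_ne.mpr hc]
          rfl
    · rw [aLoop, allB]
      simp [h]

-- Early failure of the very first pair (A[1], A[2]): both loops answer "No" at once.
lemma aLoop_fail (A : List Int) (c1 c2 r : Int) (h1 : 1 < r) (hlen : 3 ≤ A.length)
    (hf : |PySem.List.pyGetD A 1 0 - PySem.List.pyGetD A 2 0| ≠ c1) :
    aLoop A c1 c2 1 r = some "No" := by
  have g1 : PySem.List.pyGet? A 1 = some (A[1]'(by omega)) := by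
    have := PySem.List.pyGet?_eq_some_getElem A (i := 1) (by omega) (by exact_mod_cast (by omega : (1:Int) < A.length))
    simpa using this
  have g2 : PySem.List.pyGet? A 2 = some (A[2]'(by omega)) := by
    have := PySem.List.pyGet?_eq_some_getElem A (i := 2) (by omega) (by exact_mod_cast (by omega : (2:Int) < A.length))
    simpa using this
  have d1 : PySem.List.pyGetD A 1 0 = A[1]'(by omega) := by
    unfold PySem.List.pyGetD; rw [g1]; rfl
  have d2 : PySem.List.pyGetD A 2 0 = A[2]'(by omega) := by
    unfold PySem.List.pyGetD; rw [g2]; rfl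
  rw [d1, d2] at hf
  rw [aLoop]
  simp only [h1, dite_true, show (1 : Int) + 1 = 2 from rfl, g1, g2]
  rw [if_pos hf]

lemma bCheck_fail (A : List Int) (c r : Int) (h1 : 1 < r) (hlen : 3 ≤ A.length)
    (hf : |PySem.List.pyGetD A 1 0 - PySem.List.pyGetD A 2 0| ≠ c) :
    bCheck A c (PySem.List.pyRange 1 r 1) = some "No" := by
  have g1 : PySem.List.pyGet? A 1 = some (A[1]'(by omega)) := by
    have := PySem.List.pyGet?_eq_some_getElem A (i := 1) (by omega) (by exact_mod_cast (by omega : (1:Int) < A.length))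
    simpa using this
  have g2 : PySem.List.pyGet? A 2 = some (A[2]'(by omega)) := by
    have := PySem.List.pyGet?_eq_some_getElem A (i := 2) (by omega) (by exact_mod_cast (by omega : (2:Int) < A.length))
    simpa using this
  have d1 : PySem.List.pyGetD A 1 0 = A[1]'(by omega) := by
    unfold PySem.List.pyGetD; rw [g1]; rfl
  have d2 : PySem.List.pyGetD A 2 0 = A[2]'(by omega) := by
    unfold PySem.List.pyGetD; rw [g2]; rfl
  rw [d1, d2] at hf
  rw [PySem.List.pyRange_one_cons h1, bCheck]
  simp only [show (1 : Int) + 1 = 2 from rfl, g1, g2]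
  rw [if_pos hf]

-- ===== VERDICT (by name: the statement is the Claim_ definition above) =====
theorem is_valid_v_shaped_track_spec : Claim_equal_is_valid_v_shaped_track := by
  intro A N _hDom hPre
  unfold Spec_is_valid_v_shaped_track is_valid_v_shaped_track is_valid_v_shaped_track_alt
    aCore bCore
  by_cases hm : PySem.Int.mod N 2 = 0
  · rw [if_pos hm, if_neg (by rw [hm]; decide)]
  · have hm1 : PySem.Int.mod N 2 = 1 := by
      rcases PySem.Int.mod_two_eq N with h | h
      · exact absurd h hm
      · exact h
    rw [if_neg hm, if_pos hm1]
    rcases hPre with h0 | hP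
    · exact absurd h0 hm
    obtain ⟨hmr, hrest⟩ := hP
    cases hmid : PySem.List.pyGet? A (PySem.Int.floordiv N 2) with
    | none =>
      exact absurd hmr (by rwa [PySem.List.pyGet?_eq_none_iff] at hmid)
    | some am =>
      simp only [hmid]
      by_cases ham : am = 1
      case neg => rw [if_pos ham, if_neg ham]
      case pos =>
        have hdm : PySem.List.pyGetD A (PySem.Int.floordiv N 2) 0 = am := by
          unfold PySem.List.pyGetD
          rw [hmid]
          rfl
        rcases hrest with hne | hbig
        · exact absurd (hdm.trans ham) hne
        obtain ⟨hL2, hbody⟩ := hbig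
        have hLi : (2 : Int) ≤ (A.length : Int) := by exact_mod_cast hL2
        cases hA1 : PySem.List.pyGet? A 1 with
        | none =>
          exact absurd
            (show PySem.Raise.InRange A.length 1 by simp [PySem.Raise.InRange]; omega)
            ((PySem.List.pyGet?_eq_none_iff A 1).mp hA1)
        | some a1 =>
        cases hA0 : PySem.List.pyGet? A 0 with
        | none =>
          exact absurd
            (show PySem.Raise.InRange A.length 0 by simp [PySem.Raise.InRange]; omega)
            ((PySem.List.pyGet?_eq_none_iff A 0).mp hA0)
        | some a0 =>
        cases hAn1 : PySem.List.pyGet? A (-1) with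
        | none =>
          exact absurd
            (show PySem.Raise.InRange A.length (-1) by simp [PySem.Raise.InRange]; omega)
            ((PySem.List.pyGet?_eq_none_iff A (-1)).mp hAn1)
        | some an1 =>
        cases hAn2 : PySem.List.pyGet? A (-2) with
        | none =>
          exact absurd
            (show PySem.Raise.InRange A.length (-2) by simp [PySem.Raise.InRange]; omega)
            ((PySem.List.pyGet?_eq_none_iff A (-2)).mp hAn2)
        | some an2 =>
        rw [if_neg (not_not_intro ham), if_pos ham]
        simp only [hA1, hA0, hAn1, hAn2]
        have d1 : PySem.List.pyGetD A 1 0 = a1 := by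
          unfold PySem.List.pyGetD
          rw [hA1]
          rfl
        have d0 : PySem.List.pyGetD A 0 0 = a0 := by
          unfold PySem.List.pyGetD
          rw [hA0]
          rfl
        have dn1 : PySem.List.pyGetD A (-1) 0 = an1 := by
          unfold PySem.List.pyGetD
          rw [hAn1]
          rfl
        have dn2 : PySem.List.pyGetD A (-2) 0 = an2 := by
          unfold PySem.List.pyGetD
          rw [hAn2]
          rfl
        rw [d1, d0, dn1, dn2] at hbody
        by_cases hg : |a1 - a0| = |an1 - an2| ∧ |a1 - a0| ≠ 0 ∧ |an1 - an2| ≠ 0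
        · obtain ⟨he, hnz, _⟩ := hg
          rw [if_pos ⟨he, hnz, by rw [← he]; exact hnz⟩,
            if_pos (show |a1 - a0| ≠ 0 ∧ |a1 - a0| = |an1 - an2| from ⟨hnz, he⟩), ← he]
          by_cases hrun : 1 < N - 2
          · rcases hbody with hb | hb | hb | hb | hb
            · exact absurd he hb
            · exact absurd hb hnz
            · omega
            · -- all loop indices in range: both loops compute allB
              rw [aLoop_eq A |a1 - a0| (N - 2 - 1).toNat 1 (N - 2) rfl (by omega)
                    (fun _ => hb),
                  bCheck_eq A |a1 - a0| (N - 2 - 1).toNat 1 (N - 2) rfl (by omega)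
                    (fun _ => hb)]
            · -- first pair fails in range: both loops answer "No" at once
              obtain ⟨hL3, hf⟩ := hb
              have hf' : |PySem.List.pyGetD A 1 0 - PySem.List.pyGetD A 2 0| ≠ |a1 - a0| := by
                rw [d1]; exact hf
              rw [aLoop_fail A |a1 - a0| |a1 - a0| (N - 2) hrun hL3 hf',
                  bCheck_fail A |a1 - a0| (N - 2) hrun hL3 hf']
          · -- empty loop: both answer "Yes"
            rw [aLoop, dif_neg hrun, PySem.List.pyRange_one_eq_nil (by omega), bCheck]
        · have hgB : ¬ (|a1 - a0| ≠ 0 ∧ |a1 - a0| = |an1 - an2|) := by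
            rintro ⟨hz, he⟩
            exact hg ⟨he, hz, by rw [← he]; exact hz⟩
          rw [if_neg hg, if_neg hgB]
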